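-- pv_equiv track=rewrite | github.com/slant14/Database-Playground | backend-46/core/chroma/ChromaEngine.py | _format_metadata_for_dump
-- ===== SOURCE A (Python) =====
-- def _format_metadata_for_dump(metadata: dict) -> str:
--     """Format metadata dictionary as key=value,key2=value2 for dump."""
--     if not metadata:
--         return ""
--
--     formatted_pairs = []
--     for key, value in metadata.items():
--         # Escape special characters in key and value
--         escaped_key = str(key).replace('=', '\\=').replace(',', '\\,').replace(';', '\\;')
--         escaped_value = str(value).replace('=', '\\=').replace(',', '\\,').replace(';', '\\;')
--         formatted_pairs.append(f"{escaped_key}={escaped_value}")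
--
--     return ",".join(formatted_pairs)
-- ===== SOURCE B (Python) =====
-- def _format_metadata_for_dump(metadata: dict) -> str:
--     """Format metadata dictionary as key=value,key2=value2 for dump."""
--     out = []
--     for key, value in metadata.items():
--         if out:
--             out.append(',')
--         for ch in str(key):
--             if ch in '=,;':
--                 out.append('\\')
--             out.append(ch)
--         out.append('=')
--         for ch in str(value):
--             if ch in '=,;':
--                 out.append('\\')
--             out.append(ch)
--     return ''.join(out)
-- ===== Notes on version B (the rewrite author's own statement) =====
-- stated objective: alternative
-- what changed: B is a single character-streaming pass: it emits characters one at a time into one output buffer (prefixing a backslash before '=', ',' or ';' and a comma before each pair after the first), building no intermediate escaped strings, no pair list and no join of pairs, whereas A escapes each field with three chained .replace scans, collects 'k=v' pair strings and comma-joins them.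
import Mathlib
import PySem

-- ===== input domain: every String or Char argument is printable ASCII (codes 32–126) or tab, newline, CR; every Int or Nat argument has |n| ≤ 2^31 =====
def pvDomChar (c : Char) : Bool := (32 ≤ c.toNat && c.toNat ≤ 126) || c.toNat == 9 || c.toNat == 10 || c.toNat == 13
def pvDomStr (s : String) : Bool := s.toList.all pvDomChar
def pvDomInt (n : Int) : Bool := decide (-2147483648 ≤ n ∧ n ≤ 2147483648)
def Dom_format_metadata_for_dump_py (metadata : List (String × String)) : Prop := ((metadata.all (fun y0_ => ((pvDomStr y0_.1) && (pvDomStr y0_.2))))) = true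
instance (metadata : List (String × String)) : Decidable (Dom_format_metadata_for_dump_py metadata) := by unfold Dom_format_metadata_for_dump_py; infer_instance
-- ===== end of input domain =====

-- B streams characters one at a time into a single output buffer (backslash before '=', ',',
-- ';', comma before each pair after the first) instead of A's per-field .replace passes,
-- pair-string list and ",".join; same output, a different decomposition of the same cost.

-- ===== PORT A =====
-- A's escape: three chained single-char replaces, in A's order.
def escapeA (cs : List Char) : List Char :=
  PySem.Chars.replace
    (PySem.Chars.replace
      (PySem.Chars.replace cs ['='] ['\\', '='])
      [','] ['\\', ','])
    [';'] ['\\', ';']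

def format_metadata_for_dump_py (metadata : List (String × String)) : String :=
  if metadata = [] then ""
  else
    -- formatted_pairs built by appending one f-string per item
    let formatted_pairs : List (List Char) :=
      metadata.foldl (fun acc kv => acc ++ [escapeA kv.1.toList ++ ['='] ++ escapeA kv.2.toList]) []
    String.ofList (PySem.Chars.join [','] formatted_pairs)

-- ===== PORT B =====
-- B's inner loop: append '\' when the char is special, then append the char itself.
def emitB (out : List Char) (c : Char) : List Char :=
  (if c = '=' ∨ c = ',' ∨ c = ';' then out ++ ['\\'] else out) ++ [c]

def format_metadata_for_dump_py_alt (metadata : List (String × String)) : String :=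
  String.ofList
    (metadata.foldl
      (fun out kv =>
        let out := if out ≠ [] then out ++ [','] else out
        let out := kv.1.toList.foldl emitB out
        let out := out ++ ['=']
        kv.2.toList.foldl emitB out)
      [])

-- ===== PRECONDITION & SPEC =====
def Spec_format_metadata_for_dump_py (metadata : List (String × String)) (out : String) : Prop := out = format_metadata_for_dump_py_alt metadata
instance (metadata : List (String × String)) (out : String) : Decidable (Spec_format_metadata_for_dump_py metadata out) := by unfold Spec_format_metadata_for_dump_py; infer_instance

-- ===== CLAIM (what is proved, stated in full; the proofs are below) =====
def Claim_equal_format_metadata_for_dump_py : Prop := ∀ (metadata : List (String × String)), Dom_format_metadata_for_dump_py metadata → Spec_format_metadata_for_dump_py metadata (format_metadata_for_dump_py metadata)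

-- ===== LEMMAS AND PROOFS =====

-- the escaping both programs perform, in flatMap form
def escF (cs : List Char) : List Char :=
  cs.flatMap (fun c => if c = '=' ∨ c = ',' ∨ c = ';' then ['\\', c] else [c])

-- the char-content of one formatted pair
def pairF (kv : String × String) : List Char :=
  escF kv.1.toList ++ ['='] ++ escF kv.2.toList

-- ---- A side: single-char replace is a per-character flatMap ----
def esc1 (c : Char) (new : List Char) (l : List Char) : List Char :=
  l.flatMap (fun d => if d = c then new else [d])

theorem replace_go_eq (c : Char) (new : List Char) :
    ∀ (fuel : Nat) (l acc : List Char), l.length ≤ fuel →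
      PySem.Chars.replace.go [c] new fuel l acc = acc.reverse ++ esc1 c new l := by
  intro fuel
  induction fuel with
  | zero =>
    intro l acc h
    have : l = [] := List.eq_nil_of_length_eq_zero (Nat.le_zero.mp h)
    subst this; simp [PySem.Chars.replace.go, esc1]
  | succ n ih =>
    intro l acc h
    cases l with
    | nil => simp [PySem.Chars.replace.go, esc1]
    | cons d t =>
      rw [PySem.Chars.replace.go]
      by_cases hd : d = c
      · subst hd
        have hp : List.isPrefixOf [d] (d :: t) = true := by simp [List.isPrefixOf]
        simp only [hp, if_true]
        rw [ih _ _ (by simpa using h)]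
        simp [esc1]
      · have hp : List.isPrefixOf [c] (d :: t) = false := by
          simp [List.isPrefixOf]; exact fun h' => (hd h'.symm).elim
        rw [if_neg (by simp [hp]), ih _ _ (by simpa using Nat.le_of_succ_le_succ h)]
        simp [esc1, hd]

theorem replace_single (c : Char) (new : List Char) (l : List Char) :
    PySem.Chars.replace l [c] new = esc1 c new l := by
  rw [PySem.Chars.replace]
  simp only [List.isEmpty_cons, Bool.false_eq_true, if_false]
  exact replace_go_eq c new l.length l [] (le_refl _)

theorem escapeA_eq_escF (cs : List Char) : escapeA cs = escF cs := by
  unfold escapeA escF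
  rw [replace_single, replace_single, replace_single]
  induction cs with
  | nil => rfl
  | cons c t ih =>
    simp only [esc1, List.flatMap_cons] at *
    rw [← ih]
    by_cases h1 : c = '='
    · subst h1; simp
    · by_cases h2 : c = ','
      · subst h2; simp
      · by_cases h3 : c = ';'
        · subst h3; simp
        · simp [h1, h2, h3]

-- join with "," over a nonempty list, in head-plus-flatMap form
theorem join_comma (x : List Char) (xs : List (List Char)) :
    PySem.Chars.join [','] (x :: xs) = x ++ xs.flatMap (fun y => ',' :: y) := by
  induction xs generalizing x with
  | nil => simp [PySem.Chars.join_singleton]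
  | cons y ys ih => rw [PySem.Chars.join_cons_cons, ih y]; simp

-- ---- B side: the inner char loop appends escF ----
theorem foldl_emitB (cs : List Char) : ∀ out, cs.foldl emitB out = out ++ escF cs := by
  induction cs with
  | nil => simp [escF]
  | cons c t ih =>
    intro out
    rw [List.foldl_cons, ih]
    unfold emitB escF
    by_cases h : c = '=' ∨ c = ',' ∨ c = ';' <;> simp [h]

-- the item step of B's fold
def stepB (out : List Char) (kv : String × String) : List Char :=
  let out := if out ≠ [] then out ++ [','] else out
  let out := kv.1.toList.foldl emitB out
  let out := out ++ ['=']
  kv.2.toList.foldl emitB out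

theorem stepB_ne (out : List Char) (h : out ≠ []) (kv : String × String) :
    stepB out kv = out ++ (',' :: pairF kv) := by
  unfold stepB pairF
  simp only [h, if_pos, ne_eq, not_false_iff, foldl_emitB]
  simp

theorem foldl_stepB_ne (l : List (String × String)) :
    ∀ out, out ≠ [] → l.foldl stepB out = out ++ l.flatMap (fun kv => ',' :: pairF kv) := by
  induction l with
  | nil => simp
  | cons kv t ih =>
    intro out h
    rw [List.foldl_cons, stepB_ne out h kv, ih _ (by simp)]
    simp

theorem stepB_nil (kv : String × String) : stepB [] kv = pairF kv := by
  unfold stepB pairF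
  simp [foldl_emitB]

theorem pairF_ne (kv : String × String) : pairF kv ≠ [] := by
  unfold pairF
  intro h
  have := congrArg List.length h
  simp at this

-- A's accumulator loop is a map
theorem foldl_pairsA (l : List (String × String)) :
    ∀ acc, l.foldl (fun acc kv => acc ++ [escapeA kv.1.toList ++ ['='] ++ escapeA kv.2.toList]) acc
      = acc ++ l.map pairF := by
  induction l with
  | nil => simp
  | cons kv t ih =>
    intro acc
    rw [List.foldl_cons, ih]
    simp [pairF, escapeA_eq_escF]

-- ===== VERDICT (by name: the statement is the Claim_ definition above) =====
theorem format_metadata_for_dump_py_spec : Claim_equal_format_metadata_for_dump_py := by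
  intro metadata _
  unfold Spec_format_metadata_for_dump_py format_metadata_for_dump_py format_metadata_for_dump_py_alt
  cases metadata with
  | nil => simp
  | cons kv t =>
    simp only [reduceCtorEq, if_false]
    have hB : (kv :: t).foldl stepB [] = pairF kv ++ t.flatMap (fun kv => ',' :: pairF kv) := by
      rw [List.foldl_cons, stepB_nil, foldl_stepB_ne t _ (pairF_ne kv)]
    have hA := foldl_pairsA (kv :: t) []
    simp only [List.nil_append] at hA
    show String.ofList (PySem.Chars.join [','] _) = String.ofList ((kv :: t).foldl stepB [])
    rw [hA, hB, List.map_cons, join_comma, List.flatMap_map]
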